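-- pv_equiv track=rewrite | github.com/ShiroFPV/Code_Converter | Codewandler.py | bcd_to_dec
-- ===== SOURCE A (Python) =====
-- def bcd_to_dec(n):
--     decimal_result = 0
--     for i in range(0, len(n), 4):
--         bcd_digit = n[i:i+4]
--         if not all(c in '01' for c in bcd_digit):
--             raise ValueError(f"Invalid BCD digit: {bcd_digit}. Must be 0s and 1s.")
--         digit_val = int(bcd_digit, 2)
--         if digit_val > 9:
--             raise ValueError(f"Invalid BCD digit value: {digit_val}. Must be between 0-9.")
--         decimal_result = decimal_result * 10 + digit_val
--     return decimal_result
-- ===== SOURCE B (Python) =====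
-- def _bcd_digit(g):
--     if not all(c in '01' for c in g):
--         raise ValueError(f"Invalid BCD digit: {g}. Must be 0s and 1s.")
--     v = int(g, 2)
--     if v > 9:
--         raise ValueError(f"Invalid BCD digit value: {v}. Must be between 0-9.")
--     return v
--
-- def bcd_to_dec(n):
--     digits = [_bcd_digit(n[i:i+4]) for i in range(0, len(n), 4)]
--     return sum(d * 10 ** (len(digits) - 1 - i) for i, d in enumerate(digits))
-- ===== Notes on version B (the rewrite author's own statement) =====
-- stated objective: alternative
-- what changed: A validates and folds each digit into the result with Horner accumulation (result = result*10 + digit) in one loop; B moves validation into a helper, builds the digit list with a comprehension (ported as mapM over Option), and combines the digits by a positional-weight sum over enumerate instead of Horner.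
import Mathlib
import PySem

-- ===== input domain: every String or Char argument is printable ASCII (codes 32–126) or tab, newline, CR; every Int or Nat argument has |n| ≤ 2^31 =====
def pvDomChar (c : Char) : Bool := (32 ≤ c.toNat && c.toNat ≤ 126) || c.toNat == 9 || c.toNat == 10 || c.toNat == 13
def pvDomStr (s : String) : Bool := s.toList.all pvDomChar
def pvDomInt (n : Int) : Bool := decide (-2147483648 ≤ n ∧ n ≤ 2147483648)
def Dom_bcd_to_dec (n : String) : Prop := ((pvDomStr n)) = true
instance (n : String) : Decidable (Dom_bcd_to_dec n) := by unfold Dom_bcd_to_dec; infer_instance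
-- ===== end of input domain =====

-- B replaces A's in-loop Horner accumulation (result*10 + digit) by collecting the
-- validated digits and combining them afterwards with a positional-weight sum.

-- shared helpers: the group n[i:i+4], the check `all(c in '01' ...)`, and int(g, 2)
-- (exact for the checked groups: non-empty strings of '0'/'1' only)
def pvGroup (cs : List Char) (i : Int) : List Char :=
  PySem.List.slice cs (some i) (some (i + 4))
def pvGroupOk (g : List Char) : Bool := g.all (fun c => c = '0' || c = '1')
def pvBin (g : List Char) : Int :=
  g.foldl (fun a c => a * 2 + (if c = '1' then 1 else 0)) 0

-- ===== PORT A =====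
-- loop body of A: `raise` is none, excluded by Pre_
def pvStepA (cs : List Char) (acc : Option Int) (i : Int) : Option Int :=
  match acc with
  | none => none
  | some r =>
    let g := pvGroup cs i
    if pvGroupOk g then
      let v := pvBin g
      if v > 9 then none else some (r * 10 + v)
    else none

def bcd_to_dec (n : String) : Int :=
  let cs := n.toList
  ((PySem.List.pyRange 0 cs.length 4).foldl (pvStepA cs) (some 0)).getD 0

-- ===== PORT B =====
-- B's helper _bcd_digit: `raise` is none, excluded by Pre_
def pvDigit? (g : List Char) : Option Int :=
  if pvGroupOk g then
    let v := pvBin g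
    if v > 9 then none else some v
  else none

-- sum(d * 10 ** (len(digits) - 1 - i) for i, d in enumerate(digits));
-- the exponent len-1-i is ≥ 0 for every enumerate index, so .toNat is exact
def pvPosSum (ds : List Int) : Int :=
  (PySem.List.enumerate ds 0).foldl
    (fun s p => s + p.2 * 10 ^ (((ds.length : Int) - 1 - p.1).toNat)) 0

-- the comprehension [_bcd_digit(n[i:i+4]) for i in range(0, len(n), 4)] may raise,
-- so it is ported as mapM in the Option monad
def bcd_to_dec_alt (n : String) : Int :=
  let cs := n.toList
  match (PySem.List.pyRange 0 cs.length 4).mapM (fun i => pvDigit? (pvGroup cs i)) with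
  | none => 0
  | some ds => pvPosSum ds

-- ===== PRECONDITION & SPEC =====
-- exactly the inputs where A raises no ValueError: every 4-char group is all 0/1 and encodes ≤ 9
def Pre_bcd_to_dec (n : String) : Prop :=
  ∀ i ∈ PySem.List.pyRange 0 n.toList.length 4,
    pvGroupOk (pvGroup n.toList i) = true ∧ pvBin (pvGroup n.toList i) ≤ 9
instance (n : String) : Decidable (Pre_bcd_to_dec n) := by unfold Pre_bcd_to_dec; infer_instance
def pvWitness_bcd_to_dec : String := "10010000"

def Spec_bcd_to_dec (n : String) (out : Int) : Prop := out = bcd_to_dec_alt n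
instance (n : String) (out : Int) : Decidable (Spec_bcd_to_dec n out) := by unfold Spec_bcd_to_dec; infer_instance

-- ===== CLAIM (what is proved, stated in full; the proofs are below) =====
def Claim_equal_bcd_to_dec : Prop := ∀ (n : String), Dom_bcd_to_dec n → Pre_bcd_to_dec n → Spec_bcd_to_dec n (bcd_to_dec n)

-- ===== LEMMAS AND PROOFS =====

-- Horner combination, A's accumulator as a function of B's digit list
def pvHorner (ds : List Int) : Int := ds.foldl (fun a d => a * 10 + d) 0

theorem foldl_stepA_none (cs : List Char) (is : List Int) :
    is.foldl (pvStepA cs) none = none := by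
  induction is with
  | nil => rfl
  | cons i t ih => simpa [pvStepA] using ih

theorem pvStepA_some (cs : List Char) (r : Int) (i : Int) :
    pvStepA cs (some r) i = (pvDigit? (pvGroup cs i)).map (fun v => r * 10 + v) := by
  simp only [pvStepA, pvDigit?]
  split_ifs <;> rfl

theorem foldl_stepA_eq_mapM (cs : List Char) (is : List Int) (r : Int) :
    is.foldl (pvStepA cs) (some r)
      = Option.map (fun ds => ds.foldl (fun a d => a * 10 + d) r)
          (is.mapM (fun i => pvDigit? (pvGroup cs i))) := by
  induction is generalizing r with
  | nil => rfl
  | cons i t ih =>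
    simp only [List.foldl_cons, pvStepA_some, List.mapM_cons]
    cases h : pvDigit? (pvGroup cs i) with
    | none => simp [foldl_stepA_none]
    | some v =>
      simp only [Option.map_some, ih (r * 10 + v)]
      cases List.mapM (fun i => pvDigit? (pvGroup cs i)) t <;> rfl

theorem pvPosSum_eq_sum (ds : List Int) :
    pvPosSum ds =
      ((PySem.List.enumerate ds 0).map
        (fun p => p.2 * 10 ^ (((ds.length : Int) - 1 - p.1).toNat))).sum := by
  simpa using PySem.List.foldl_add
    (l := PySem.List.enumerate ds 0) (a := 0)
    (g := fun p => p.2 * 10 ^ (((ds.length : Int) - 1 - p.1).toNat))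

theorem pvSum_shift (t : List Int) (s : Int) (m : Int) :
    ((PySem.List.enumerate t (s + 1)).map (fun p => p.2 * 10 ^ ((m - p.1).toNat))).sum
      = ((PySem.List.enumerate t s).map (fun p => p.2 * 10 ^ ((m - 1 - p.1).toNat))).sum := by
  induction t generalizing s with
  | nil => rfl
  | cons d t ih =>
    simp only [PySem.List.enumerate_cons, List.map_cons, List.sum_cons, ih]
    have h : (m - (s + 1)).toNat = (m - 1 - s).toNat := by omega
    rw [h]

theorem pvPosSum_cons (d : Int) (t : List Int) :
    pvPosSum (d :: t) = d * 10 ^ t.length + pvPosSum t := by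
  rw [pvPosSum_eq_sum, pvPosSum_eq_sum]
  simp only [PySem.List.enumerate_cons, List.map_cons, List.sum_cons, List.length_cons]
  have h1 : (((t.length + 1 : Nat) : Int) - 1 - 0).toNat = t.length := by omega
  rw [h1]
  congr 1
  rw [pvSum_shift t 0 (((t.length + 1 : Nat) : Int) - 1)]
  congr 1
  apply List.map_congr_left
  intro p _
  congr 2
  omega

theorem pvHorner_eq_pvPosSum (ds : List Int) :
    pvHorner ds = pvPosSum ds := by
  suffices h : ∀ a, ds.foldl (fun a d => a * 10 + d) a = a * 10 ^ ds.length + pvPosSum ds by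
    simpa [pvHorner] using h 0
  induction ds with
  | nil => intro a; simp [pvPosSum, PySem.List.enumerate]
  | cons d t ih =>
    intro a
    simp only [List.foldl_cons, ih, pvPosSum_cons, List.length_cons]
    ring

-- on Pre_, B's mapM never hits none
theorem mapM_digit_isSome (cs : List Char) (is : List Int)
    (h : ∀ i ∈ is, pvGroupOk (pvGroup cs i) = true ∧ pvBin (pvGroup cs i) ≤ 9) :
    ∃ ds, is.mapM (fun i => pvDigit? (pvGroup cs i)) = some ds := by
  induction is with
  | nil => exact ⟨[], rfl⟩
  | cons i t ih =>
    obtain ⟨hok, hle⟩ := h i (List.mem_cons_self ..)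
    obtain ⟨ds, hds⟩ := ih (fun j hj => h j (List.mem_cons_of_mem _ hj))
    refine ⟨pvBin (pvGroup cs i) :: ds, ?_⟩
    have hd : pvDigit? (pvGroup cs i) = some (pvBin (pvGroup cs i)) := by
      simp [pvDigit?, hok]; omega
    simp [List.mapM_cons, hd, hds]

-- ===== VERDICT (by name: the statement is the Claim_ definition above) =====
theorem bcd_to_dec_spec : Claim_equal_bcd_to_dec := by
  intro n _ hpre
  unfold Spec_bcd_to_dec bcd_to_dec bcd_to_dec_alt
  obtain ⟨ds, hds⟩ := mapM_digit_isSome n.toList (PySem.List.pyRange 0 n.toList.length 4) hpre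
  have hA := foldl_stepA_eq_mapM n.toList (PySem.List.pyRange 0 n.toList.length 4) 0
  simp only [hA, hds, Option.map_some, Option.getD_some]
  exact pvHorner_eq_pvPosSum ds
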